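-- pv_equiv track=rewrite | github.com/eroge-69/PyToExe | python-files/header_gui_cute.py | org_domain
-- ===== SOURCE A (Python) =====
-- ORG_DOMAINS = {"qualitest.com", "qualitestgroup.com"}  # Edit for your org
--
-- def naive_org_domain(domain: str | None) -> str | None:
--     if not domain:
--         return None
--     parts = domain.lower().strip(".").split(".")
--     if len(parts) >= 2:
--         return ".".join(parts[-2:])
--     return domain.lower()
--
-- def org_domain(domain: str | None) -> str | None:
--     if not domain:
--         return None
--     d = domain.lower().strip(".")
--     for org in ORG_DOMAINS:
--         if d == org or d.endswith("." + org):
--             return org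
--     return naive_org_domain(d)
-- ===== SOURCE B (Python) =====
-- # B: canonicalize once to the last-two-labels domain and return it directly --
-- # no per-org suffix scan (every ORG_DOMAINS entry is exactly its own last two
-- # labels, so the canonical key already equals the matched org).
-- def org_domain(domain):
--     if not domain:
--         return None
--     d = domain.lower().strip(".")
--     if not d:
--         return None
--     return ".".join(d.split(".")[-2:])
-- ===== Notes on version B (the rewrite author's own statement) =====
-- stated objective: simpler
-- what changed: B replaces A's loop over ORG_DOMAINS with endswith suffix tests (plus the separate naive_org_domain fallback that re-lowercases, re-strips and re-splits) by a single canonicalization: lowercase, strip boundary dots, split on dots and join the last two labels, which already equals the matched org wherever A's scan hits and equals A's fallback otherwise.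
import Mathlib
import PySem

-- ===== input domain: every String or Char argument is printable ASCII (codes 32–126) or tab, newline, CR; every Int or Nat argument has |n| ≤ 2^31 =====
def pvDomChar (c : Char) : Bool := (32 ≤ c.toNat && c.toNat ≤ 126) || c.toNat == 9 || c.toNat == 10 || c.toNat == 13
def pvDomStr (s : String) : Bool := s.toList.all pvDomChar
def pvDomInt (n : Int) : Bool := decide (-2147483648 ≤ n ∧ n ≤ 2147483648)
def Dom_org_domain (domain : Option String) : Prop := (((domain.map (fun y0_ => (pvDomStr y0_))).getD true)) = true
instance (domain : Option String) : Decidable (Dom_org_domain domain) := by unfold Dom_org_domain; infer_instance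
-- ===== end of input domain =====

-- B simplifies A: one canonicalization (lowercase, strip dots, join the last two labels)
-- replaces A's per-org suffix scan and its separate fallback helper; return values proved equal.

-- ===== PORT A =====
-- Python iterates the 2-element set ORG_DOMAINS; at most one entry can match any given d
-- (neither entry is a suffix of the other), so the iteration order is immaterial;
-- ported as a list in literal order.
def pvOrgDomains : List (List Char) :=
  [['q','u','a','l','i','t','e','s','t','.','c','o','m'],
   ['q','u','a','l','i','t','e','s','t','g','r','o','u','p','.','c','o','m']]

def naive_org_domain (domain : Option String) : Option String :=
  match domain with
  | none => none
  | some s =>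
    if s.toList = [] then none          -- `if not domain` on a str
    else
      let parts := PySem.Chars.splitOn (PySem.Chars.stripChars (PySem.Chars.lower s.toList) ['.']) ['.']
      if 2 ≤ parts.length then
        some (String.ofList (PySem.Chars.join ['.'] (PySem.List.slice parts (some (-2)) none)))
      else some (String.ofList (PySem.Chars.lower s.toList))

def org_domain (domain : Option String) : Option String :=
  match domain with
  | none => none
  | some s =>
    if s.toList = [] then none          -- `if not domain`
    else
      let d := PySem.Chars.stripChars (PySem.Chars.lower s.toList) ['.']
      -- the for-loop with early return: first org with d == org or d.endswith("." + org)
      match pvOrgDomains.find? (fun org => d == org || PySem.Chars.endswith d ('.' :: org)) with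
      | some org => some (String.ofList org)
      | none => naive_org_domain (some (String.ofList d))

-- ===== PORT B =====
def org_domain_alt (domain : Option String) : Option String :=
  match domain with
  | none => none
  | some s =>
    if s.toList = [] then none          -- `if not domain`
    else
      let d := PySem.Chars.stripChars (PySem.Chars.lower s.toList) ['.']
      if d = [] then none               -- `if not d`
      else
        some (String.ofList (PySem.Chars.join ['.']
          (PySem.List.slice (PySem.Chars.splitOn d ['.']) (some (-2)) none)))

-- ===== PRECONDITION & SPEC =====
def Spec_org_domain (domain : Option String) (out : Option String) : Prop := out = org_domain_alt domain
instance (domain : Option String) (out : Option String) : Decidable (Spec_org_domain domain out) := by unfold Spec_org_domain; infer_instance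

-- ===== CLAIM (what is proved, stated in full; the proofs are below) =====
def Claim_equal_org_domain : Prop := ∀ (domain : Option String), Dom_org_domain domain → Spec_org_domain domain (org_domain domain)

-- ===== LEMMAS AND PROOFS =====

-- a simple structural model of str.split(".") used only in the proofs
def pvSplit : List Char → List (List Char)
  | [] => [[]]
  | c :: t => if c = '.' then [] :: pvSplit t else (pvSplit t).modifyHead (c :: ·)

theorem pvSplit_ne_nil (l : List Char) : pvSplit l ≠ [] := by
  cases l with
  | nil => simp [pvSplit]
  | cons c t =>
    simp only [pvSplit]
    split_ifs
    · simp
    · cases h : pvSplit t with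
      | nil => exact absurd h (pvSplit_ne_nil t)
      | cons p ps => simp

theorem pvSplit_dot (t : List Char) : pvSplit ('.'::t) = [] :: pvSplit t := by
  simp [pvSplit]

theorem pvSplit_consNe (c : Char) (t : List Char) (hc : c ≠ '.') :
    pvSplit (c::t) = (pvSplit t).modifyHead (c :: ·) := by
  simp [pvSplit, hc]

theorem pv_go_eq (fuel : ℕ) : ∀ (l cur : List Char) (acc : List (List Char)), l.length < fuel →
    PySem.Chars.splitOn.go ['.'] fuel l cur acc
      = acc.reverse ++ ((cur.reverse ++ (pvSplit l).headI) :: (pvSplit l).tail) := by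
  induction fuel with
  | zero => intro l cur acc h; exact absurd h (Nat.not_lt_zero _)
  | succ n ih =>
    intro l cur acc h
    cases l with
    | nil => simp [PySem.Chars.splitOn.go, pvSplit]
    | cons c rest =>
      have hgo : PySem.Chars.splitOn.go ['.'] (n+1) (c::rest) cur acc
          = if ['.'].isPrefixOf (c::rest) then
              PySem.Chars.splitOn.go ['.'] n (List.drop 1 (c::rest)) [] (cur.reverse :: acc)
            else PySem.Chars.splitOn.go ['.'] n rest (c::cur) acc := rfl
      rw [hgo]
      by_cases hc : c = '.'
      · subst hc
        rw [if_pos (by simp [List.isPrefixOf])]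
        rw [show List.drop 1 ('.'::rest) = rest from rfl]
        rw [ih rest [] (cur.reverse :: acc) (Nat.lt_of_succ_lt_succ h)]
        rw [pvSplit_dot]
        cases hps : pvSplit rest with
        | nil => exact absurd hps (pvSplit_ne_nil rest)
        | cons p ps => simp
      · rw [if_neg (by simp [List.isPrefixOf]; exact Ne.symm hc)]
        rw [ih rest (c::cur) acc (Nat.lt_of_succ_lt_succ h)]
        rw [pvSplit_consNe c rest hc]
        cases hps : pvSplit rest with
        | nil => exact absurd hps (pvSplit_ne_nil rest)
        | cons p ps => simp

theorem pv_splitOn_eq (l : List Char) : PySem.Chars.splitOn l ['.'] = pvSplit l := by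
  unfold PySem.Chars.splitOn
  rw [pv_go_eq (l.length+1) l [] [] (by omega)]
  cases hps : pvSplit l with
  | nil => exact absurd hps (pvSplit_ne_nil l)
  | cons p ps => simp

theorem pvSplit_append (a b : List Char) : pvSplit (a ++ '.' :: b) = pvSplit a ++ pvSplit b := by
  induction a with
  | nil => simp [pvSplit]
  | cons c t ih =>
    by_cases hc : c = '.'
    · subst hc; simp [pvSplit, ih]
    · simp only [List.cons_append, pvSplit, if_neg hc, ih]
      cases hps : pvSplit t with
      | nil => exact absurd hps (pvSplit_ne_nil t)
      | cons p ps => simp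

theorem pv_join_pvSplit (l : List Char) : PySem.Chars.join ['.'] (pvSplit l) = l := by
  induction l with
  | nil => decide
  | cons c t ih =>
    by_cases hc : c = '.'
    · subst hc
      rw [pvSplit_dot]
      cases hps : pvSplit t with
      | nil => exact absurd hps (pvSplit_ne_nil t)
      | cons p ps =>
        rw [hps] at ih
        rw [PySem.Chars.join_cons_cons]
        simp [ih]
    · simp only [pvSplit, if_neg hc]
      cases hps : pvSplit t with
      | nil => exact absurd hps (pvSplit_ne_nil t)
      | cons p ps =>
        rw [hps] at ih
        cases ps with
        | nil =>
          rw [PySem.Chars.join_singleton] at ih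
          simp [List.modifyHead, PySem.Chars.join_singleton, ih]
        | cons q qs =>
          rw [PySem.Chars.join_cons_cons] at ih
          simp only [List.modifyHead]
          rw [PySem.Chars.join_cons_cons, ← ih]
          simp

theorem pv_lowerChar_idem (c : Char) : PySem.Chars.lowerChar (PySem.Chars.lowerChar c) = PySem.Chars.lowerChar c := by
  by_cases hu : PySem.Chars.isupper c = true
  · have h1 : 65 ≤ c.toNat := by
      have := hu
      simp only [PySem.Chars.isupper, Bool.and_eq_true, decide_eq_true_eq] at this
      exact this.1
    have h2 : c.toNat ≤ 90 := by
      have := hu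
      simp only [PySem.Chars.isupper, Bool.and_eq_true, decide_eq_true_eq] at this
      exact this.2
    have hval : (Char.ofNat (c.toNat + 32)).toNat = c.toNat + 32 := by
      rw [Char.toNat_ofNat, if_pos]
      exact Or.inl (by omega)
    have hlc : PySem.Chars.lowerChar c = Char.ofNat (c.toNat + 32) := by
      unfold PySem.Chars.lowerChar
      rw [if_pos hu]
    have h90 : (90:ℕ) < (Char.ofNat (c.toNat + 32)).toNat := by omega
    have hni : PySem.Chars.isupper (Char.ofNat (c.toNat + 32)) = false := by
      simp only [PySem.Chars.isupper, Bool.and_eq_false_iff]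
      right
      simp only [decide_eq_false_iff_not]
      exact Char.not_le.mpr h90
    rw [hlc]
    unfold PySem.Chars.lowerChar
    rw [hni]
    simp
  · have hlc : PySem.Chars.lowerChar c = c := by
      unfold PySem.Chars.lowerChar
      rw [if_neg hu]
    rw [hlc, hlc]

theorem pv_lower_eq_self {l : List Char} (h : ∀ c ∈ l, PySem.Chars.lowerChar c = c) :
    PySem.Chars.lower l = l := by
  unfold PySem.Chars.lower
  exact (List.map_congr_left h).trans (List.map_id l)

theorem pv_mem_strip {c : Char} {l cs : List Char} (h : c ∈ PySem.Chars.stripChars l cs) : c ∈ l := by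
  unfold PySem.Chars.stripChars at h
  rw [List.mem_reverse] at h
  have h2 := (List.dropWhile_sublist (l := (List.dropWhile (fun c => cs.contains c) l).reverse)
    (p := fun c => cs.contains c)).subset h
  rw [List.mem_reverse] at h2
  exact (List.dropWhile_sublist (p := fun c => cs.contains c) (l := l)).subset h2

theorem pv_strip_idem (l cs : List Char) :
    PySem.Chars.stripChars (PySem.Chars.stripChars l cs) cs = PySem.Chars.stripChars l cs := by
  have hdef : ∀ m : List Char, PySem.Chars.stripChars m cs
      = List.rdropWhile (fun c => cs.contains c) (List.dropWhile (fun c => cs.contains c) m) := by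
    intro m; rfl
  rw [hdef, hdef]
  set p : Char → Bool := fun c => cs.contains c with hp
  set Y := List.dropWhile p l with hY
  have h1 : List.dropWhile p (List.rdropWhile p Y) = List.rdropWhile p Y := by
    rw [List.dropWhile_eq_self_iff]
    intro hl
    have hpre := List.rdropWhile_prefix (p := p) (l := Y)
    have hYlen : 0 < Y.length := lt_of_lt_of_le hl hpre.length_le
    rw [hpre.getElem hl]
    have := List.dropWhile_get_zero_not p l (by simpa [hY] using hYlen)
    simpa [hY, List.get_eq_getElem] using this
  rw [h1, List.rdropWhile_idempotent]

theorem pv_slice_last_two {α : Type} (xs : List α) (a b : α) :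
    PySem.List.slice (xs ++ [a,b]) (some (-2)) none = [a,b] := by
  simp only [PySem.List.slice, PySem.List.clampIdx]
  have hL : (xs ++ [a,b]).length = xs.length + 2 := by simp
  rw [hL]
  rw [if_pos (by norm_num : (-2:Int) < 0)]
  rw [if_neg (show ¬(((xs.length + 2 : ℕ) : Int) + -2 < 0) by push_cast; omega)]
  rw [show (((xs.length + 2 : ℕ) : Int) + -2).toNat = xs.length by omega]
  rw [show xs.length + 2 - xs.length = 2 by omega]
  rw [List.drop_left]
  rfl

theorem pv_slice_singleton {α : Type} (a : α) :
    PySem.List.slice [a] (some (-2)) none = [a] := rfl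

-- pvSplit of the two concrete org domains
theorem pv_match (d org : List Char) (hmem : org ∈ pvOrgDomains)
    (h : d = org ∨ PySem.Chars.endswith d ('.' :: org) = true) :
    d ≠ [] ∧ PySem.Chars.join ['.'] (PySem.List.slice (PySem.Chars.splitOn d ['.']) (some (-2)) none) = org := by
  have horg : ∃ o1 o2, pvSplit org = [o1, o2] ∧ org ≠ [] := by
    simp only [pvOrgDomains, List.mem_cons, List.not_mem_nil, or_false] at hmem
    rcases hmem with rfl | rfl
    · exact ⟨_, _, rfl, by decide⟩
    · exact ⟨_, _, rfl, by decide⟩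
  obtain ⟨o1, o2, hsp, hne⟩ := horg
  rcases h with rfl | hend
  · refine ⟨hne, ?_⟩
    rw [pv_splitOn_eq, hsp]
    have hsl := pv_slice_last_two ([] : List (List Char)) o1 o2
    simp only [List.nil_append] at hsl
    rw [hsl, ← pv_join_pvSplit d, hsp]
  · have hsuf : ('.' :: org) <:+ d := (PySem.Chars.endswith_iff d ('.' :: org)).mp hend
    obtain ⟨x, hx⟩ := hsuf
    subst hx
    refine ⟨by simp, ?_⟩
    rw [pv_splitOn_eq, pvSplit_append, hsp]
    cases hpx : pvSplit x with
    | nil => exact absurd hpx (pvSplit_ne_nil x)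
    | cons p ps =>
      rw [pv_slice_last_two, ← pv_join_pvSplit org, hsp]

theorem pv_main (domain : Option String) : org_domain domain = org_domain_alt domain := by
  cases domain with
  | none => rfl
  | some s =>
    by_cases hs : s.toList = []
    · simp [org_domain, org_domain_alt, hs]
    · simp only [org_domain, org_domain_alt, if_neg hs]
      set d := PySem.Chars.stripChars (PySem.Chars.lower s.toList) ['.'] with hd
      have hlow : PySem.Chars.lower d = d := by
        apply pv_lower_eq_self
        intro c hc
        have hmem : c ∈ PySem.Chars.lower s.toList := pv_mem_strip (by rwa [← hd])
        unfold PySem.Chars.lower at hmem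
        obtain ⟨c', _, rfl⟩ := List.mem_map.mp hmem
        exact pv_lowerChar_idem c'
      have hstrip : PySem.Chars.stripChars d ['.'] = d := by
        rw [hd]; exact pv_strip_idem _ _
      cases hf : pvOrgDomains.find? (fun org => d == org || PySem.Chars.endswith d ('.' :: org)) with
      | some org =>
        have hmem : org ∈ pvOrgDomains := List.mem_of_find?_eq_some hf
        have hcond := List.find?_some hf
        simp only [Bool.or_eq_true, beq_iff_eq] at hcond
        obtain ⟨hne, hjoin⟩ := pv_match d org hmem hcond
        rw [if_neg hne, hjoin]
      | none =>
        simp only [naive_org_domain]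
        have htl : (String.ofList d).toList = d := by simp
        by_cases hdnil : d = []
        · simp [hdnil]
        · simp only [htl, if_neg hdnil]
          rw [hlow, hstrip]
          by_cases hlen : 2 ≤ (PySem.Chars.splitOn d ['.']).length
          · simp [if_pos hlen]
          · rw [if_neg hlen]
            have hps := pv_splitOn_eq d
            cases hsp : pvSplit d with
            | nil => exact absurd hsp (pvSplit_ne_nil d)
            | cons p ps =>
              rw [hsp] at hps
              cases ps with
              | cons q qs => rw [hps] at hlen; simp at hlen
              | nil =>
                have hpd : p = d := by
                  have := pv_join_pvSplit d
                  rw [hsp, PySem.Chars.join_singleton] at this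
                  exact this
                rw [hps, pv_slice_singleton, PySem.Chars.join_singleton, hpd]

-- ===== VERDICT (by name: the statement is the Claim_ definition above) =====
theorem org_domain_spec : Claim_equal_org_domain := by
  intro domain _
  unfold Spec_org_domain
  exact pv_main domain
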